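-- pv_equiv track=rewrite | github.com/Biwoco-Playground/Learn-Docker_VNL | exrcise_chapter1and2/test-crawl.py | pr_a
-- ===== SOURCE A (Python) =====
-- def get_content(a):
--     content =''
--     check =0
--     for i in a:
--         if i == '>' and check == 0:
--             check += 1
--             continue
--         elif i == '<' and check ==1:
--             check +=1
--         if check == 1:
--             content = content + i
--         if check == 2:
--             break
--     return content
--
-- def get_links(s):
--     content =''
--     t = 0
--     for i in s:
--         if i == '"' and t == 0:
--             t += 1
--             continue
--         elif i == '"' and t == 1:
--             t += 1
--         if t == 1:
--             content = content + i
--         if t == 2: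
--             break
--     return content
--
-- def pr_a(k):
--     a = []
--     for i in k:
--         d = {}
--         d['title']= get_content(i)
--         d['links'] = get_links(i)
--         a.append(d)
--     return a
-- ===== SOURCE B (Python) =====
-- def _between(s, opener, closer):
--     # text after the first `opener` up to (not including) the next `closer`,
--     # or the whole rest if no closer; '' if there is no opener.
--     _, sep, rest = s.partition(opener)
--     return rest.split(closer, 1)[0] if sep else ''
--
-- def pr_a(k):
--     return [{'title': _between(s, '>', '<'), 'links': _between(s, '"', '"')} for s in k]
-- ===== Notes on version B (the rewrite author's own statement) =====
-- stated objective: idiomatic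
-- what changed: Replaced the two hand-written character-by-character counter state machines with str.partition to find the opening delimiter and str.split(closer, 1) to cut at the next closing one, and pr_a's accumulator loop with a list comprehension. (C-level str.partition/split replace per-character Python loops)
import Mathlib
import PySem

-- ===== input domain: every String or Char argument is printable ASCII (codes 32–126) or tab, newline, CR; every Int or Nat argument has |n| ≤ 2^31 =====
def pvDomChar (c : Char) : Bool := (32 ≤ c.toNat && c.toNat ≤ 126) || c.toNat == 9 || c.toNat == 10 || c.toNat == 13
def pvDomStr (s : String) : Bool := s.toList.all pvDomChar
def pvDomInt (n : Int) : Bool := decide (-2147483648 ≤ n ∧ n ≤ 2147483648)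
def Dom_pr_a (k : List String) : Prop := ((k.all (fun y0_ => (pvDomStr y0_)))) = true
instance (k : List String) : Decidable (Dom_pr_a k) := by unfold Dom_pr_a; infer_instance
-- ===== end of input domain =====

-- B replaces A's character-by-character state machines with partition/split (dropWhile/takeWhile in the port): simpler and more idiomatic, same results.


-- ===== PORT A =====
-- state machine shared by get_content ('>','<') and get_links ('"','"'):
-- the two Python helpers are this loop with those characters plugged in
def pvGetAux (o c : Char) : List Char → List Char → Nat → List Char
  | [], content, _ => content
  | i :: rest, content, check =>
    if i = o ∧ check = 0 then pvGetAux o c rest content 1        -- continue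
    else
      let check' := if i = c ∧ check = 1 then 2 else check
      let content' := if check' = 1 then content ++ [i] else content
      if check' = 2 then content' else pvGetAux o c rest content' check'

def get_content (a : String) : String := String.ofList (pvGetAux '>' '<' a.toList [] 0)
def get_links (s : String) : String := String.ofList (pvGetAux '"' '"' s.toList [] 0)

def pr_a : List String → List (List (String × String))
  | [] => []
  | i :: rest => [("title", get_content i), ("links", get_links i)] :: pr_a rest

-- ===== PORT B =====
-- Source B's _between: s.partition(opener) then rest.split(closer, 1)[0]
def pvBetween (cs : List Char) (o c : Char) : List Char :=
  match cs.dropWhile (fun x => x ≠ o) with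
  | [] => []                                    -- no opener: partition's sep is empty
  | _ :: rest => rest.takeWhile (fun x => x ≠ c) -- split(closer,1)[0]

def pr_a_alt (k : List String) : List (List (String × String)) :=
  k.map (fun s =>
    [("title", String.ofList (pvBetween s.toList '>' '<')),
     ("links", String.ofList (pvBetween s.toList '"' '"'))])

-- ===== PRECONDITION & SPEC =====
def Spec_pr_a (k : List String) (out : List (List (String × String))) : Prop := out = pr_a_alt k
instance (k : List String) (out : List (List (String × String))) : Decidable (Spec_pr_a k out) := by unfold Spec_pr_a; infer_instance

-- ===== CLAIM (what is proved, stated in full; the proofs are below) =====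
def Claim_equal_pr_a : Prop := ∀ (k : List String), Dom_pr_a k → Spec_pr_a k (pr_a k)

-- ===== LEMMAS AND PROOFS =====
-- phase 1 (after the opener): the machine appends until the closer = takeWhile
lemma pvGetAux_one (o c : Char) (cs content : List Char) :
    pvGetAux o c cs content 1 = content ++ cs.takeWhile (fun x => x ≠ c) := by
  induction cs generalizing content with
  | nil => simp [pvGetAux]
  | cons i rest ih =>
    by_cases h : i = c
    · simp [pvGetAux, h, List.takeWhile]
    · simp [pvGetAux, h, List.takeWhile, ih]

-- phase 0 (before the opener): the machine skips to the opener = dropWhile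
lemma pvGetAux_zero (o c : Char) (cs content : List Char) :
    pvGetAux o c cs content 0 = content ++ pvBetween cs o c := by
  induction cs generalizing content with
  | nil => simp [pvGetAux, pvBetween]
  | cons i rest ih =>
    by_cases h : i = o
    · simp [pvGetAux, h, pvBetween, List.dropWhile, pvGetAux_one]
    · simp [pvGetAux, h, pvBetween, List.dropWhile, ih]

lemma pr_a_eq (k : List String) : pr_a k = pr_a_alt k := by
  induction k with
  | nil => rfl
  | cons s rest ih =>
    simp [pr_a, pr_a_alt, get_content, get_links, pvGetAux_zero, ih]

-- ===== VERDICT (by name: the statement is the Claim_ definition above) =====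
theorem pr_a_spec : Claim_equal_pr_a := by
  intro k _
  exact pr_a_eq k
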